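-- pv_equiv track=rewrite | github.com/Oryan-Hassidim/Ex | Exam/2020_B_Bet.py | opti
-- ===== SOURCE A (Python) =====
-- def opti(i, j, table, depth, so_far=0):
--     if j >= len(table[i]):
--         return
--     so_far += table[i][j]
--     if depth == 1:
--         yield so_far
--         return
--     yield from opti(i+1, j, table, depth-1, so_far)
--     yield from opti(i+1, j+1, table, depth-1, so_far)
-- ===== SOURCE B (Python) =====
-- def opti(i, j, table, depth, so_far=0):
--     # Iterative re-implementation: explicit stack of frames replaces recursion.
--     stack = [(i, j, depth, so_far)]
--     while stack:
--         ci, cj, d, s = stack.pop()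
--         if cj >= len(table[ci]):
--             continue
--         s += table[ci][cj]
--         if d == 1:
--             yield s
--             continue
--         # push right child first so the left child is popped (expanded) first
--         stack.append((ci + 1, cj + 1, d - 1, s))
--         stack.append((ci + 1, cj, d - 1, s))
-- ===== Notes on version B (the rewrite author's own statement) =====
-- stated objective: alternative
-- what changed: The recursive generator is replaced by an iterative generator driven by an explicit stack of (i, j, depth, so_far) frames, pushing the right child before the left so yields come out in the original left-to-right order.
-- outside the precondition, e.g. on opti(0, -1, [[1, 2]], 1, 0): A returns [2], B returns [2]; on opti(0, 0, [[5], []], 3, 0): A returns [], B returns []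
import Mathlib
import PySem

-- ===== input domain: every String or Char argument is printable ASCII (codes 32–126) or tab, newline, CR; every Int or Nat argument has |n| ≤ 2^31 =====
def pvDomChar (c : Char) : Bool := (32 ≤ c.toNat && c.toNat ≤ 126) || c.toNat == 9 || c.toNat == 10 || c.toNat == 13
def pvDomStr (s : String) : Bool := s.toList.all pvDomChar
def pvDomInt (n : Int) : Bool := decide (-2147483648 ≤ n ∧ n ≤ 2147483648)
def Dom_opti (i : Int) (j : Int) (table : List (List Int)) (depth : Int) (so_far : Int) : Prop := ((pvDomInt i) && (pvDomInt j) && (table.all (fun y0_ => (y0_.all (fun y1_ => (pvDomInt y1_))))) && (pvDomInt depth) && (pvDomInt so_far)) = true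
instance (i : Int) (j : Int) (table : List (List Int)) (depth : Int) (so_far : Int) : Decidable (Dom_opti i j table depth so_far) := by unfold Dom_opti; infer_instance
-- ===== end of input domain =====

-- B replaces A's recursive generator by an iterative loop over an explicit stack of
-- frames (same yield order: the left child is pushed last, so popped first); objective:
-- alternative decomposition, same asymptotic cost.

-- ===== PORT A =====
-- helper (termination of the ports): a successful Python index table[i] implies i < len(table)
theorem pvGetSomeLt {α : Type} (xs : List α) (i : Int) (x : α)
    (h : PySem.List.pyGet? xs i = some x) : i < (xs.length : Int) := by
  by_contra hlt
  have : PySem.List.pyGet? xs i = none := by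
    rw [PySem.List.pyGet?_eq_none_iff]
    intro hr
    exact hlt hr.2
  simp [this] at h

-- literal port of A: the list of values the generator yields (a Python IndexError is
-- the 'none' branch; Pre_opti excludes those inputs)
def opti (i : Int) (j : Int) (table : List (List Int)) (depth : Int) (so_far : Int) : List Int :=
  match h : PySem.List.pyGet? table i with
  | none => []
  | some row =>
    if (row.length : Int) ≤ j then []
    else
      match PySem.List.pyGet? row j with
      | none => []
      | some v =>
        if depth == 1 then [so_far + v]
        else opti (i+1) j table (depth-1) (so_far + v) ++
             opti (i+1) (j+1) table (depth-1) (so_far + v)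
termination_by ((table.length : Int) - i).toNat
decreasing_by
  · have := pvGetSomeLt table i row h; omega
  · have := pvGetSomeLt table i row h; omega

-- ===== PORT B =====
-- the while-loop of Source B: head of the list = top of the stack
def optiLoop (table : List (List Int)) (stack : List (Int × Int × Int × Int)) : List Int :=
  match stack with
  | [] => []
  | (ci, cj, d, s) :: rest =>
    match hci : PySem.List.pyGet? table ci with
    | none => []
    | some row =>
      if (row.length : Int) ≤ cj then optiLoop table rest
      else
        match PySem.List.pyGet? row cj with
        | none => []
        | some v =>
          if d == 1 then (s + v) :: optiLoop table rest
          else optiLoop table ((ci+1, cj, d-1, s+v) :: (ci+1, cj+1, d-1, s+v) :: rest)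
termination_by (stack.map (fun f => 3 ^ (((table.length : Int) - f.1).toNat))).sum
decreasing_by
  · simp only [List.map_cons, List.sum_cons]
    have h1 : 1 ≤ 3 ^ (((table.length : Int) - ci).toNat) := Nat.one_le_pow _ _ (by omega)
    omega
  · simp only [List.map_cons, List.sum_cons]
    have h1 : 1 ≤ 3 ^ (((table.length : Int) - ci).toNat) := Nat.one_le_pow _ _ (by omega)
    omega
  · simp only [List.map_cons, List.sum_cons]
    have hlt := pvGetSomeLt table ci row hci
    have hk : (((table.length : Int) - ci).toNat) = (((table.length : Int) - (ci+1)).toNat) + 1 := by omega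
    have h1 : 1 ≤ 3 ^ (((table.length : Int) - (ci+1)).toNat) := Nat.one_le_pow _ _ (by omega)
    have hg : 3 ^ (((table.length : Int) - ci).toNat) =
        3 * 3 ^ (((table.length : Int) - (ci+1)).toNat) := by
      rw [hk, pow_succ]; ring
    omega

def opti_alt (i : Int) (j : Int) (table : List (List Int)) (depth : Int) (so_far : Int) : List Int :=
  optiLoop table [(i, j, depth, so_far)]

-- ===== PRECONDITION & SPEC =====
-- Pre_opti: the inputs on which the Python A returns normally: either the very first
-- guard prunes (start row exists — possibly via negative-index wraparound — and j is
-- past its end), or the walk starts at a nonnegative (i, j) and a path of length depth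
-- fits inside the table.  It excludes (with the reason in one sentence each, cites in
-- claim.json): inputs where negative i or j wrap around and the walk still returns, and
-- inputs whose depth overruns the table but every branch happens to be pruned by a
-- short row first — in both families whether A returns or raises IndexError depends on
-- the whole row-length profile, not on a closed-form shape condition.  (A walk may
-- start at a negative i in [-len, len): Python wraps that first index; that case is
-- inside Pre_ and both programs behave identically there.)
def Pre_opti (i : Int) (j : Int) (table : List (List Int)) (depth : Int) (so_far : Int) : Prop :=
  (-(table.length : Int) ≤ i ∧ i < table.length ∧
     ((PySem.List.pyGetD table i []).length : Int) ≤ j) ∨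
  (-(table.length : Int) ≤ i ∧ 0 ≤ j ∧ 1 ≤ depth ∧ i + depth ≤ table.length)
instance (i : Int) (j : Int) (table : List (List Int)) (depth : Int) (so_far : Int) : Decidable (Pre_opti i j table depth so_far) := by unfold Pre_opti; infer_instance

def pvWitness_opti : Int × Int × List (List Int) × Int × Int := (0, 0, [[1], [2, 3]], 2, 0)

def Spec_opti (i : Int) (j : Int) (table : List (List Int)) (depth : Int) (so_far : Int) (out : List Int) : Prop := out = opti_alt i j table depth so_far
instance (i : Int) (j : Int) (table : List (List Int)) (depth : Int) (so_far : Int) (out : List Int) : Decidable (Spec_opti i j table depth so_far out) := by unfold Spec_opti; infer_instance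

-- ===== CLAIM (what is proved, stated in full; the proofs are below) =====
def Claim_equal_opti : Prop := ∀ (i : Int) (j : Int) (table : List (List Int)) (depth : Int) (so_far : Int), Dom_opti i j table depth so_far → Pre_opti i j table depth so_far → Spec_opti i j table depth so_far (opti i j table depth so_far)

-- ===== LEMMAS AND PROOFS =====

-- one unfolding step of the port of A when the outer index succeeds
theorem opti_step (i j d s : Int) (table : List (List Int)) (row : List Int)
    (hrow : PySem.List.pyGet? table i = some row) :
    opti i j table d s =
      if (row.length : Int) ≤ j then []
      else
        match PySem.List.pyGet? row j with
        | none => []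
        | some v =>
          if d == 1 then [s + v]
          else opti (i+1) j table (d-1) (s + v) ++ opti (i+1) (j+1) table (d-1) (s + v) := by
  rw [opti]
  split
  · simp_all
  · rename_i r heq
    rw [hrow] at heq
    injection heq with heq
    subst heq
    rfl

-- one unfolding step of the loop of B when the outer index succeeds
theorem optiLoop_step (ci cj d s : Int) (table : List (List Int)) (row : List Int)
    (rest : List (Int × Int × Int × Int))
    (hrow : PySem.List.pyGet? table ci = some row) :
    optiLoop table ((ci, cj, d, s) :: rest) =
      if (row.length : Int) ≤ cj then optiLoop table rest
      else
        match PySem.List.pyGet? row cj with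
        | none => []
        | some v =>
          if d == 1 then (s + v) :: optiLoop table rest
          else optiLoop table ((ci+1, cj, d-1, s+v) :: (ci+1, cj+1, d-1, s+v) :: rest) := by
  rw [optiLoop]
  split
  · simp_all
  · rename_i r heq
    rw [hrow] at heq
    injection heq with heq
    subst heq
    rfl

-- processing one safe frame emits exactly A's output for that frame, then continues
theorem optiLoop_frame (table : List (List Int)) :
    ∀ (n : Nat) (i j d s : Int) (rest : List (Int × Int × Int × Int)),
      ((table.length : Int) - i).toNat ≤ n →
      Pre_opti i j table d s →
      optiLoop table ((i, j, d, s) :: rest) = opti i j table d s ++ optiLoop table rest := by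
  intro n
  induction n with
  | zero =>
    intro i j d s rest hn hpre
    exfalso
    rcases hpre with ⟨_, hlt, _⟩ | ⟨h0, _, hd, hlen⟩ <;> omega
  | succ n ih =>
    intro i j d s rest hn hpre
    have hin : PySem.Raise.InRange table.length i := by
      constructor <;>
        rcases hpre with ⟨hge, hlt, _⟩ | ⟨h0, _, hd, hlen⟩ <;> omega
    obtain ⟨row, hrow⟩ : ∃ row, PySem.List.pyGet? table i = some row := by
      cases hg : PySem.List.pyGet? table i with
      | none => exact absurd ((PySem.List.pyGet?_eq_none_iff _ _).mp hg) (not_not_intro hin)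
      | some r => exact ⟨r, rfl⟩
    rw [optiLoop_step i j d s table row rest hrow, opti_step i j d s table row hrow]
    by_cases hj : (row.length : Int) ≤ j
    · simp [hj]
    · simp only [hj, if_false]
      have hj0 : 0 ≤ j := by
        rcases hpre with ⟨_, _, hjl⟩ | ⟨_, hj0, _, _⟩
        · exfalso
          have : PySem.List.pyGetD table i [] = row := by
            simp [PySem.List.pyGetD, hrow]
          rw [this] at hjl; omega
        · exact hj0
      have hlt := pvGetSomeLt table i row hrow
      have hv : PySem.List.pyGet? row j = some row[j.toNat] :=
        PySem.List.pyGet?_eq_some_getElem row hj0 (by omega)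
      simp only [hv]
      by_cases hd1 : d = 1
      · simp [hd1]
      · have hpre2 : -(table.length : Int) ≤ i ∧ 0 ≤ j ∧ 1 ≤ d ∧ i + d ≤ (table.length : Int) := by
          rcases hpre with ⟨_, _, hjl⟩ | h
          · exfalso
            have : PySem.List.pyGetD table i [] = row := by
              simp [PySem.List.pyGetD, hrow]
            rw [this] at hjl; omega
          · exact h
        obtain ⟨hi0, _, hd, hlen⟩ := hpre2
        have hbe : (d == 1) = false := by simp [hd1]
        simp only [hbe]
        have hL : Pre_opti (i+1) j table (d-1) (s + row[j.toNat]) := by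
          right; refine ⟨by omega, hj0, by omega, by omega⟩
        have hR : Pre_opti (i+1) (j+1) table (d-1) (s + row[j.toNat]) := by
          right; refine ⟨by omega, by omega, by omega, by omega⟩
        have hm : ((table.length : Int) - (i+1)).toNat ≤ n := by omega
        rw [ih (i+1) j (d-1) (s + row[j.toNat]) ((i+1, j+1, d-1, s + row[j.toNat]) :: rest) hm hL,
            ih (i+1) (j+1) (d-1) (s + row[j.toNat]) rest hm hR]
        simp [List.append_assoc]

-- ===== VERDICT (by name: the statement is the Claim_ definition above) =====
theorem opti_spec : Claim_equal_opti := by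
  intro i j table depth so_far _ hpre
  unfold Spec_opti opti_alt
  rw [optiLoop_frame table ((table.length : Int) - i).toNat i j depth so_far [] le_rfl hpre]
  have hnil : optiLoop table [] = [] := by rw [optiLoop]
  rw [hnil, List.append_nil]
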